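-- pv_equiv track=rewrite | github.com/TensorDevLJ/CyberGuard-AI-Full-Stack-Risk-Assessment-System | backend/ml_engine.py | _get_resource_sensitivity
-- ===== SOURCE A (Python) =====
-- def _get_resource_sensitivity(resource):
--     """Assign sensitivity level to resources"""
--     if not resource:
--         return 1
--
--     resource_lower = resource.lower()
--     if any(keyword in resource_lower for keyword in ['admin', 'root', 'system']):
--         return 5
--     elif any(keyword in resource_lower for keyword in ['config', 'database', 'backup']):
--         return 4
--     elif any(keyword in resource_lower for keyword in ['financial', 'hr', 'personal']):
--         return 4
--     elif any(keyword in resource_lower for keyword in ['restricted', 'confidential']):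
--         return 3
--     else:
--         return 2
-- ===== SOURCE B (Python) =====
-- _SENSITIVITY = {
--     'admin': 5, 'root': 5, 'system': 5,
--     'config': 4, 'database': 4, 'backup': 4,
--     'financial': 4, 'hr': 4, 'personal': 4,
--     'restricted': 3, 'confidential': 3,
-- }
--
-- def _get_resource_sensitivity(resource):
--     if not resource:
--         return 1
--     resource_lower = resource.lower()
--     levels = [lvl for kw, lvl in _SENSITIVITY.items() if kw in resource_lower]
--     return max(levels) if levels else 2
-- ===== Notes on version B (the rewrite author's own statement) =====
-- stated objective: simpler
-- what changed: Replaces the ordered if/elif chain of any()-scans with a single keyword-to-level table scanned once, returning the maximum matched level (default 2); correct because the tiers' levels are their priority order.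
import Mathlib
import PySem

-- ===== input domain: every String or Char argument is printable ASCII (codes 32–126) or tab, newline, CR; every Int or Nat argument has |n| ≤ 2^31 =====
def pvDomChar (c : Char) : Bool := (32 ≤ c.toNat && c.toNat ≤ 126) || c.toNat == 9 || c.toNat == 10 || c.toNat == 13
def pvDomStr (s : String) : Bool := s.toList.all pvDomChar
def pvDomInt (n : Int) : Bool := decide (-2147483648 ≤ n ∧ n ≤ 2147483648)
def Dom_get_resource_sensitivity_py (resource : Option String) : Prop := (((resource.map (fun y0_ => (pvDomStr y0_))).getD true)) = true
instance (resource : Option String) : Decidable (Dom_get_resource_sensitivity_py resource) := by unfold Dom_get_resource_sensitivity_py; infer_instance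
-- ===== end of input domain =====

-- B replaces A's ordered if/elif chain with one keyword→level table and a max over matches (objective: simpler).

-- ===== PORT A =====
def get_resource_sensitivity_py (resource : Option String) : Int :=
  match resource with
  | none => 1
  | some r =>
    if r = "" then 1
    else
      let resource_lower := PySem.Str.lower r
      if [ "admin", "root", "system" ].any (fun k => PySem.Str.isIn k resource_lower) then 5
      else if [ "config", "database", "backup" ].any (fun k => PySem.Str.isIn k resource_lower) then 4
      else if [ "financial", "hr", "personal" ].any (fun k => PySem.Str.isIn k resource_lower) then 4
      else if [ "restricted", "confidential" ].any (fun k => PySem.Str.isIn k resource_lower) then 3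
      else 2

-- ===== PORT B =====
def pvSensitivityTable : List (String × Int) :=
  [("admin", 5), ("root", 5), ("system", 5),
   ("config", 4), ("database", 4), ("backup", 4),
   ("financial", 4), ("hr", 4), ("personal", 4),
   ("restricted", 3), ("confidential", 3)]

def get_resource_sensitivity_py_alt (resource : Option String) : Int :=
  match resource with
  | none => 1
  | some r =>
    if r = "" then 1
    else
      let resource_lower := PySem.Str.lower r
      let levels := pvSensitivityTable.filterMap
        (fun p => if PySem.Str.isIn p.1 resource_lower then some p.2 else none)
      match PySem.List.max? levels (fun x => x) with
      | some m => m
      | none => 2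

-- ===== PRECONDITION & SPEC =====
def Spec_get_resource_sensitivity_py (resource : Option String) (out : Int) : Prop := out = get_resource_sensitivity_py_alt resource
instance (resource : Option String) (out : Int) : Decidable (Spec_get_resource_sensitivity_py resource out) := by unfold Spec_get_resource_sensitivity_py; infer_instance

-- ===== CLAIM (what is proved, stated in full; the proofs are below) =====
def Claim_equal_get_resource_sensitivity_py : Prop := ∀ (resource : Option String), Dom_get_resource_sensitivity_py resource → Spec_get_resource_sensitivity_py resource (get_resource_sensitivity_py resource)

-- ===== LEMMAS AND PROOFS =====

-- A's if/elif chain as a function of the eleven keyword-hit booleans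
def pvA (b1 b2 b3 b4 b5 b6 b7 b8 b9 b10 b11 : Bool) : Int :=
  if b1 || (b2 || (b3 || false)) then 5
  else if b4 || (b5 || (b6 || false)) then 4
  else if b7 || (b8 || (b9 || false)) then 4
  else if b10 || (b11 || false) then 3
  else 2

-- B's max-over-matches as a function of the same eleven booleans
def pvB (b1 b2 b3 b4 b5 b6 b7 b8 b9 b10 b11 : Bool) : Int :=
  match PySem.List.max?
      ((if b1 then [(5:Int)] else []) ++ ((if b2 then [5] else []) ++ ((if b3 then [5] else []) ++
       ((if b4 then [4] else []) ++ ((if b5 then [4] else []) ++ ((if b6 then [4] else []) ++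
       ((if b7 then [4] else []) ++ ((if b8 then [4] else []) ++ ((if b9 then [4] else []) ++
       ((if b10 then [3] else []) ++ ((if b11 then [3] else []) ++ [])))))))))))
      (fun x => x) with
  | some m => m
  | none => 2

theorem pv_fm_step (f : String → Bool) (k : String) (v : Int) (rest : List (String × Int)) :
    List.filterMap (fun p => if f p.1 then some p.2 else none) ((k,v)::rest)
    = (if f k then [v] else []) ++ List.filterMap (fun p => if f p.1 then some p.2 else none) rest := by
  by_cases h : f k <;> simp [h]

set_option maxHeartbeats 1000000 in
theorem pv_key : ∀ b1 b2 b3 b4 b5 b6 b7 b8 b9 b10 b11 : Bool,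
    pvA b1 b2 b3 b4 b5 b6 b7 b8 b9 b10 b11 = pvB b1 b2 b3 b4 b5 b6 b7 b8 b9 b10 b11 := by
  decide

set_option maxHeartbeats 1000000 in
theorem pv_main (f : String → Bool) :
    (if [ "admin", "root", "system" ].any f then (5:Int)
     else if [ "config", "database", "backup" ].any f then 4
     else if [ "financial", "hr", "personal" ].any f then 4
     else if [ "restricted", "confidential" ].any f then 3
     else 2)
    = (match PySem.List.max? (pvSensitivityTable.filterMap
          (fun p => if f p.1 then some p.2 else none)) (fun x => x) with
       | some m => m
       | none => 2) := by
  refine Eq.trans (b := pvA (f "admin") (f "root") (f "system") (f "config") (f "database")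
      (f "backup") (f "financial") (f "hr") (f "personal") (f "restricted") (f "confidential")) rfl ?_
  rw [pv_key]
  simp only [pvB, pvSensitivityTable, pv_fm_step, List.filterMap_nil]

-- ===== VERDICT (by name: the statement is the Claim_ definition above) =====
theorem get_resource_sensitivity_py_spec : Claim_equal_get_resource_sensitivity_py := by
  intro resource _
  unfold Spec_get_resource_sensitivity_py get_resource_sensitivity_py get_resource_sensitivity_py_alt
  cases resource with
  | none => rfl
  | some r =>
    by_cases h : r = ""
    · simp [h]
    · simp only [if_neg h]
      exact pv_main (fun k => PySem.Str.isIn k (PySem.Str.lower r))
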